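-- pv_equiv track=rewrite | github.com/lehancode/uba_computacion | parciales/Python - ComB-20240715/solucion.py | tateti
-- ===== SOURCE A (Python) =====
-- def tateti(m: list[list[chr]], ficha: str) -> bool:
--   contador: int = 0
--   for fila in m:
--     for cuadrado in fila:
--       if cuadrado == ficha:
--         contador += 1
--         if contador == 3:
--           return True
--       else:
--         contador = 0
--     contador = 0
--   return False
-- ===== SOURCE B (Python) =====
-- def tateti(m, ficha):
--     # sliding window of three consecutive cells per row, instead of a running counter
--     return any(a == ficha and b == ficha and c == ficha
--                for fila in m
--                for a, b, c in zip(fila, fila[1:], fila[2:]))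
-- ===== Notes on version B (the rewrite author's own statement) =====
-- stated objective: idiomatic
-- what changed: Replaces the running-counter state machine with a stateless any() over length-3 sliding windows (zip of the row with its two shifted copies), row resets becoming implicit.
import Mathlib
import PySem

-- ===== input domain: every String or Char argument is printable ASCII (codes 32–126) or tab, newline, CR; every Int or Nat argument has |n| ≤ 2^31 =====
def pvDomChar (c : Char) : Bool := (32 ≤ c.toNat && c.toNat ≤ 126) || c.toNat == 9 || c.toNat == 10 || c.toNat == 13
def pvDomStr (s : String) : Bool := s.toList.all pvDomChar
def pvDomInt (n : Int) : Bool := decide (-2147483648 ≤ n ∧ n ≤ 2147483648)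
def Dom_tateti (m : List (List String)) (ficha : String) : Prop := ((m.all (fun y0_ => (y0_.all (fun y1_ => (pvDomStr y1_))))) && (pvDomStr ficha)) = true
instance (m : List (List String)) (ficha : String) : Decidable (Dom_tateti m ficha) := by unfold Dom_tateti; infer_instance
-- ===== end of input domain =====

-- B replaces A's running-counter state machine by a stateless sliding-window check (idiomatic, same cost).

-- ===== PORT A =====
-- inner loop of A: threads the counter `contador` through the cells of one row;
-- returning true mirrors A's early `return True` when the counter reaches 3
def tatetiRow (ficha : String) (contador : Int) : List String → Bool
  | [] => false
  | cuadrado :: rest =>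
    if cuadrado == ficha then
      (if contador + 1 == 3 then true else tatetiRow ficha (contador + 1) rest)
    else
      tatetiRow ficha 0 rest

-- outer loop of A: the counter is reset to 0 after each row, so each row starts at 0
def tatetiRows (ficha : String) : List (List String) → Bool
  | [] => false
  | fila :: rest => if tatetiRow ficha 0 fila then true else tatetiRows ficha rest

def tateti (m : List (List String)) (ficha : String) : Bool :=
  tatetiRows ficha m

-- ===== PORT B =====
-- fila[1:] / fila[2:] with literal nonnegative starts are exactly List.drop 1 / List.drop 2;
-- Python's 3-ary zip is ported as nested pair zips
def tateti_alt (m : List (List String)) (ficha : String) : Bool :=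
  m.any (fun fila =>
    ((fila.zip (fila.drop 1)).zip (fila.drop 2)).any
      (fun p => p.1.1 == ficha && p.1.2 == ficha && p.2 == ficha))

-- ===== PRECONDITION & SPEC =====
def Spec_tateti (m : List (List String)) (ficha : String) (out : Bool) : Prop := out = tateti_alt m ficha
instance (m : List (List String)) (ficha : String) (out : Bool) : Decidable (Spec_tateti m ficha out) := by unfold Spec_tateti; infer_instance

-- ===== CLAIM (what is proved, stated in full; the proofs are below) =====
def Claim_equal_tateti : Prop := ∀ (m : List (List String)) (ficha : String), Dom_tateti m ficha → Spec_tateti m ficha (tateti m ficha)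

-- ===== LEMMAS AND PROOFS =====

-- proof-side helpers: `win f row` = some window of 3 consecutive cells equal to f
def starts1 (f : String) : List String → Bool
  | a :: _ => a == f
  | _ => false

def startsFF (f : String) : List String → Bool
  | a :: b :: _ => (a == f) && (b == f)
  | _ => false

def win (f : String) : List String → Bool
  | [] => false
  | a :: t => ((a == f) && startsFF f t) || win f t

theorem startsFF_cons (f a : String) (t : List String) :
    startsFF f (a :: t) = ((a == f) && starts1 f t) := by
  cases t <;> simp [startsFF, starts1]

theorem startsFF_imp (f : String) (t : List String) :
    starts1 f t = false → startsFF f t = false := by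
  cases t with
  | nil => intro _; rfl
  | cons b u => intro h; rw [startsFF_cons]; simp [starts1] at h; simp [starts1, h]

theorem tatetiRow_win (f : String) (row : List String) :
    tatetiRow f 0 row = win f row ∧
    tatetiRow f 1 row = (startsFF f row || win f row) ∧
    tatetiRow f 2 row = (starts1 f row || win f row) := by
  induction row with
  | nil => simp [tatetiRow, win, startsFF, starts1]
  | cons a t ih =>
    obtain ⟨ih0, ih1, ih2⟩ := ih
    by_cases h : (a == f) = true
    · refine ⟨?_, ?_, ?_⟩
      · simp [tatetiRow, win, h, ih1]
      · rw [startsFF_cons]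
        by_cases hs : starts1 f t = true
        · simp [tatetiRow, win, h, hs, ih2]
        · simp only [Bool.not_eq_true] at hs
          have hff := startsFF_imp f t hs
          simp [tatetiRow, win, h, hs, hff, ih2]
      · simp [tatetiRow, win, starts1, h]
    · simp only [Bool.not_eq_true] at h
      refine ⟨?_, ?_, ?_⟩
      · simp [tatetiRow, win, h, ih0]
      · rw [startsFF_cons]; simp [tatetiRow, win, h, ih0]
      · simp [tatetiRow, win, starts1, h, ih0]

theorem win_zip (f : String) (row : List String) :
    win f row =
      ((row.zip (row.drop 1)).zip (row.drop 2)).any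
        (fun p => p.1.1 == f && p.1.2 == f && p.2 == f) := by
  induction row with
  | nil => simp [win]
  | cons a t ih =>
    cases t with
    | nil => simp [win, startsFF]
    | cons b u =>
      cases u with
      | nil => simp [win, startsFF]
      | cons c r =>
        simp only [win, startsFF_cons, starts1, List.drop, List.zip_cons_cons,
          List.any_cons] at *
        rw [ih]
        simp [Bool.and_assoc]

theorem if_true_or (x y : Bool) : (if x = true then true else y) = (x || y) := by
  cases x <;> simp

theorem tateti_eq_alt (m : List (List String)) (ficha : String) :
    tateti m ficha = tateti_alt m ficha := by
  unfold tateti tateti_alt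
  induction m with
  | nil => simp [tatetiRows]
  | cons fila rest ih =>
    rw [List.any_cons, tatetiRows, (tatetiRow_win ficha fila).1, win_zip, if_true_or, ih]

-- ===== VERDICT (by name: the statement is the Claim_ definition above) =====
theorem tateti_spec : Claim_equal_tateti := by
  intro m ficha _
  exact tateti_eq_alt m ficha
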